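-- pv_equiv track=rewrite | github.com/DeltaE/PyPSA_BC | src/bc_power/utils.py | create_standard_gen_bus_map
-- ===== SOURCE A (Python) =====
-- def create_standard_gen_bus_map(buses):
--     '''
--     This function accepts a list a buses and returns a mapping from the buses to the lowest voltage
--     bus for each unique node code. The underlying assumption used in selecting a bus to connect a generator to is that
--     generators are connected the lowest voltage bus at their given node location.
--     Example:
--     Buses = ["230_ABN_GSS", "138_ABN_GSS","500_MCA_GSS", "63_MCA_GSS"] -> bus_dict = {ABN_GSS:138, MCA_GSS:63}
--     '''
--     bus_dict = {}
--     # Assume generators are connected to lowest voltage bus at their given node_code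
--     for bus in buses:
--         node = "_".join(bus.split('_')[1:])
--         voltage = int(bus.split('_')[0])
--         if node not in bus_dict.keys():
--             bus_dict[node] = voltage
--         else:
--             bus_dict[node] = min(voltage,bus_dict[node])
--
--     return bus_dict
-- ===== SOURCE B (Python) =====
-- def create_standard_gen_bus_map(buses):
--     # Group-then-reduce: first build node -> list of voltages, then take min of each group.
--     groups = {}
--     for bus in buses:
--         parts = bus.split('_')
--         node = "_".join(parts[1:])
--         voltage = int(parts[0])
--         groups.setdefault(node, []).append(voltage)
--     return {node: min(vs) for node, vs in groups.items()}
-- ===== Notes on version B (the rewrite author's own statement) =====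
-- stated objective: alternative
-- what changed: B replaces A's running-minimum dictionary with a two-pass group-then-reduce: a first pass collects every voltage per node into lists, a second pass takes min of each group.
import Mathlib
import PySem

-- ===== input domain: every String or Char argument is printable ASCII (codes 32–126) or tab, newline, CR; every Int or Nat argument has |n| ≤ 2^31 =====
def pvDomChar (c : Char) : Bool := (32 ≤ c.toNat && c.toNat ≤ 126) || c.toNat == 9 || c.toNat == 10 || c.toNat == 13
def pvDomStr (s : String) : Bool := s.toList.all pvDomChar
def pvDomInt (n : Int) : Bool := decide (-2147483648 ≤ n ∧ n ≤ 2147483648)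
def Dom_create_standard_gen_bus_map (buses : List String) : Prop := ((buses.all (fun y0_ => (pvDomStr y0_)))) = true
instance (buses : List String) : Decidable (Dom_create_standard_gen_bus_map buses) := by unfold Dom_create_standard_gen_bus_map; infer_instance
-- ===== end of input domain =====

-- B replaces A's running-minimum dict with a two-pass group-then-reduce (node -> voltage list, then min per group); same cost, alternative decomposition.


-- shared parsing helpers: both Pythons compute node = "_".join(bus.split('_')[1:]) and voltage = int(bus.split('_')[0])
def pvNodeOf (bus : String) : String :=
  PySem.Str.join "_" (((PySem.Str.split? bus "_").getD []).drop 1)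
def pvVoltStr (bus : String) : String :=
  ((PySem.Str.split? bus "_").getD []).headD ""

-- ===== PORT A =====
-- Option state models int()'s ValueError (none = raised); the else branch keeps a running minimum.
def pvStepA (acc : Option (PySem.Dict String Int)) (bus : String) : Option (PySem.Dict String Int) :=
  match acc with
  | none => none
  | some d =>
    let node := pvNodeOf bus
    match PySem.Int.ofStr? (pvVoltStr bus) with
    | none => none
    | some voltage =>
      some (if d.contains node = false then d.insert node voltage
            else d.insert node (min voltage (d.getD node 0)))

def create_standard_gen_bus_map (buses : List String) : List (String × Int) :=
  match buses.foldl pvStepA (some PySem.Dict.empty) with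
  | some d => d.items
  | none => []   -- unreachable under Pre_ (int() raised)

-- ===== PORT B =====
-- min(vs) in Source B; vs is never empty there, so the default 0 is never used.
def pvMin (vs : List Int) : Int := PySem.List.minD vs (fun x => x) 0

-- first pass of Source B: groups.setdefault(node, []).append(voltage)
def pvStepB (acc : Option (PySem.Dict String (List Int))) (bus : String) : Option (PySem.Dict String (List Int)) :=
  match acc with
  | none => none
  | some g =>
    let node := pvNodeOf bus
    match PySem.Int.ofStr? (pvVoltStr bus) with
    | none => none
    | some voltage => some (g.modify node [] (fun vs => vs ++ [voltage]))

def create_standard_gen_bus_map_alt (buses : List String) : List (String × Int) :=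
  match buses.foldl pvStepB (some PySem.Dict.empty) with
  | none => []   -- unreachable under Pre_ (int() raised)
  | some g =>
    -- second pass of Source B: {node: min(vs) for node, vs in groups.items()}
    (g.items.foldl (fun d p => d.insert p.1 (pvMin p.2)) PySem.Dict.empty).items

-- ===== PRECONDITION & SPEC =====
-- the characters of bus.split('_')[0], read directly off the string
def pvHeadChars (bus : String) : List Char := bus.toList.takeWhile (fun c => !(c == '_'))

-- Pre_ excludes exactly the inputs where int(bus.split('_')[0]) raises ValueError in both Pythons.
def Pre_create_standard_gen_bus_map (buses : List String) : Prop :=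
  ∀ b ∈ buses, (PySem.Int.ofChars? (pvHeadChars b)).isSome = true
instance (buses : List String) : Decidable (Pre_create_standard_gen_bus_map buses) := by
  unfold Pre_create_standard_gen_bus_map; infer_instance

def pvWitness_create_standard_gen_bus_map : List String :=
  ["230_ABN_GSS", "138_ABN_GSS", "500_MCA_GSS", "63_MCA_GSS"]

def Spec_create_standard_gen_bus_map (buses : List String) (out : List (String × Int)) : Prop := out = create_standard_gen_bus_map_alt buses
instance (buses : List String) (out : List (String × Int)) : Decidable (Spec_create_standard_gen_bus_map buses out) := by unfold Spec_create_standard_gen_bus_map; infer_instance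

-- ===== CLAIM (what is proved, stated in full; the proofs are below) =====
def Claim_equal_create_standard_gen_bus_map : Prop := ∀ (buses : List String), Dom_create_standard_gen_bus_map buses → Pre_create_standard_gen_bus_map buses → Spec_create_standard_gen_bus_map buses (create_standard_gen_bus_map buses)

-- ===== LEMMAS AND PROOFS =====

-- any accumulated pieces come out (reversed) in front of the rest of the split
lemma pvGo_acc (sep : List Char) (fuel : Nat) :
    ∀ (l cur acc : List Char) (accs : List (List Char)),
      PySem.Chars.splitOn.go sep fuel l cur (acc :: accs) =
        (acc :: accs).reverse ++ PySem.Chars.splitOn.go sep fuel l cur [] := by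
  induction fuel with
  | zero => intro l cur acc accs; simp [PySem.Chars.splitOn.go]
  | succ fuel ih =>
    intro l cur acc accs
    cases l with
    | nil => simp [PySem.Chars.splitOn.go]
    | cons c rest =>
      simp only [PySem.Chars.splitOn.go]
      by_cases h : sep.isPrefixOf (c :: rest) = true
      · rw [if_pos h, if_pos h, ih, ih _ _ cur.reverse []]
        simp
      · rw [if_neg h, if_neg h, ih]

-- the first piece of a split on '_' is the longest '_'-free prefix
lemma pvGo_head (fuel : Nat) :
    ∀ (l cur : List Char), l.length < fuel →
      (PySem.Chars.splitOn.go ['_'] fuel l cur []).headD [] =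
        cur.reverse ++ l.takeWhile (fun c => !(c == '_')) := by
  induction fuel with
  | zero => intro l cur h; omega
  | succ fuel ih =>
    intro l cur h
    cases l with
    | nil => simp [PySem.Chars.splitOn.go]
    | cons c rest =>
      simp only [PySem.Chars.splitOn.go]
      by_cases hc : c = '_'
      · have hpre : List.isPrefixOf ['_'] (c :: rest) = true := by
          subst hc; simp [List.isPrefixOf]
        rw [if_pos hpre, pvGo_acc]
        subst hc
        simp [List.takeWhile]
      · have hpre : ¬ List.isPrefixOf ['_'] (c :: rest) = true := by
          simp [List.isPrefixOf]; exact fun hEq => hc hEq.symm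
        rw [if_neg hpre, ih rest (c :: cur) (by simp at h ⊢; omega)]
        have hct : (!(c == '_')) = true := by simp [hc]
        simp [List.takeWhile, hct]

lemma pvVoltStr_toList (b : String) : (pvVoltStr b).toList = pvHeadChars b := by
  have hmap := PySem.Str.split?_map b "_"
  have hb : ("_" : String).toList = ['_'] := rfl
  rw [hb, PySem.Chars.split?, if_neg (by simp)] at hmap
  cases hsp : PySem.Str.split? b "_" with
  | none => rw [hsp] at hmap; simp at hmap
  | some ss =>
    rw [hsp, Option.map_some, Option.some.injEq] at hmap
    have hh : (ss.headD "").toList = (ss.map String.toList).headD [] := by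
      cases ss <;> simp
    unfold pvVoltStr
    rw [hsp, Option.getD_some, hh, hmap, PySem.Chars.splitOn,
      pvGo_head (b.toList.length + 1) b.toList [] (by omega)]
    simp [pvHeadChars]

lemma pvVolt_eq (b : String) :
    PySem.Int.ofStr? (pvVoltStr b) = PySem.Int.ofChars? (pvHeadChars b) := by
  show PySem.Int.ofChars? (pvVoltStr b).toList = _
  rw [pvVoltStr_toList]

-- loop invariant: A's dict holds the running min of each of B's groups (same keys, same order),
-- B's group lists are nonempty, B's keys are distinct
def pvRel (d : PySem.Dict String Int) (g : PySem.Dict String (List Int)) : Prop :=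
  d.items = g.items.map (fun p => (p.1, pvMin p.2)) ∧ g.keys.Nodup ∧ ∀ p ∈ g.items, p.2 ≠ []

lemma pvMin_singleton (v : Int) : pvMin [v] = v := by
  simp [pvMin, PySem.List.minD, PySem.List.min?_id_cons]

lemma pvMin_append (x : Int) (t : List Int) (v : Int) :
    pvMin (x :: (t ++ [v])) = min v (pvMin (x :: t)) := by
  simp [pvMin, PySem.List.minD, PySem.List.min?_id_cons, List.foldl_append, min_comm]

lemma pvRel_empty : pvRel PySem.Dict.empty PySem.Dict.empty := by
  refine ⟨rfl, by simp [PySem.Dict.keys, PySem.Dict.empty], by simp [PySem.Dict.empty]⟩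

lemma pvRel_step (d : PySem.Dict String Int) (g : PySem.Dict String (List Int))
    (node : String) (v : Int) (h : pvRel d g) :
    pvRel (if d.contains node = false then d.insert node v
           else d.insert node (min v (d.getD node 0)))
          (g.modify node [] (fun vs => vs ++ [v])) := by
  obtain ⟨hit, hnd, hne⟩ := h
  have hkeys : d.keys = g.keys := by
    simp only [PySem.Dict.keys, hit, List.map_map]; rfl
  have hdnd : d.keys.Nodup := hkeys ▸ hnd
  have hcont : d.contains node = g.contains node := by
    rw [PySem.Dict.contains_eq_decide_mem_keys, PySem.Dict.contains_eq_decide_mem_keys, hkeys]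
  rw [PySem.Dict.modify]
  by_cases hc : g.contains node = true
  · -- node already present: A updates the running min, B appends to the group
    obtain ⟨p, hpmem, hp1⟩ : ∃ p ∈ g.items, p.1 = node := by
      have := PySem.Dict.contains_eq_decide_mem_keys g node ▸ hc
      simpa [PySem.Dict.keys] using of_decide_eq_true this
    obtain ⟨vs, rfl⟩ : ∃ vs, p = (node, vs) := ⟨p.2, by rw [← hp1]⟩
    have hgget : g.getD node [] = vs := PySem.Dict.getD_of_mem_items g hpmem hnd []
    obtain ⟨x, t, rfl⟩ : ∃ x t, vs = x :: t := by
      cases vs with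
      | nil => exact absurd rfl (hne _ hpmem)
      | cons x t => exact ⟨x, t, rfl⟩
    have hdget : d.getD node 0 = pvMin (x :: t) :=
      PySem.Dict.getD_of_mem_items d (by rw [hit]; exact List.mem_map_of_mem hpmem) hdnd 0
    have hdc : d.contains node = true := hcont ▸ hc
    refine ⟨?_, ?_, ?_⟩
    · rw [if_neg (by simp [hdc]),
        PySem.Dict.items_insert_of_contains _ _ hdc,
        PySem.Dict.items_insert_of_contains _ _ hc, hit, List.map_map, List.map_map]
      refine List.map_congr_left (fun q _ => ?_)
      by_cases hq : q.1 = node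
      · have hmin := pvMin_append x t v
        simp [Function.comp, hq, hdget, hgget, hmin]
      · simp [Function.comp, hq]
    · have : (g.insert node (g.getD node [] ++ [v])).keys = g.keys :=
        PySem.Dict.keys_insert_of_contains _ _ hc
      rw [this]; exact hnd
    · intro q hq
      rw [PySem.Dict.items_insert_of_contains _ _ hc] at hq
      obtain ⟨r, hr, hrq⟩ := List.mem_map.mp hq
      by_cases h1 : r.1 = node
      · simp only [h1, beq_self_eq_true, if_true] at hrq
        rw [← hrq]; simp [hgget]
      · simp only [beq_iff_eq, h1, if_false] at hrq
        rw [← hrq]; exact hne r hr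
  · -- fresh node: both append a new entry
    have hc' : g.contains node = false := by simpa using hc
    have hdc : d.contains node = false := hcont ▸ hc'
    have hgget : g.getD node [] = [] := PySem.Dict.getD_of_not_contains g [] hc'
    refine ⟨?_, ?_, ?_⟩
    · rw [if_pos hdc, PySem.Dict.items_insert_of_not_contains _ _ hdc,
        PySem.Dict.items_insert_of_not_contains _ _ hc', hit, List.map_append, hgget]
      simp [pvMin_singleton]
    · rw [PySem.Dict.keys_insert_of_not_contains _ _ hc']
      refine List.nodup_append.mpr ⟨hnd, List.nodup_singleton _, ?_⟩
      intro a ha b hb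
      rw [List.mem_singleton] at hb
      subst hb
      intro hEq
      subst hEq
      have := PySem.Dict.contains_eq_decide_mem_keys g a ▸ hc'
      exact absurd ha (by simpa using this)
    · intro q hq
      rw [PySem.Dict.items_insert_of_not_contains _ _ hc'] at hq
      rcases List.mem_append.mp hq with h | h
      · exact hne q h
      · simp only [List.mem_singleton] at h; rw [h, hgget]; simp
  
lemma pvLoop (buses : List String) (d : PySem.Dict String Int) (g : PySem.Dict String (List Int))
    (hpre : ∀ b ∈ buses, (PySem.Int.ofStr? (pvVoltStr b)).isSome = true) (h : pvRel d g) :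
    ∃ d' g', buses.foldl pvStepA (some d) = some d' ∧
      buses.foldl pvStepB (some g) = some g' ∧ pvRel d' g' := by
  induction buses generalizing d g with
  | nil => exact ⟨d, g, rfl, rfl, h⟩
  | cons b rest ih =>
    obtain ⟨v, hv⟩ := Option.isSome_iff_exists.mp (hpre b (List.mem_cons_self))
    have hA : pvStepA (some d) b =
        some (if d.contains (pvNodeOf b) = false then d.insert (pvNodeOf b) v
              else d.insert (pvNodeOf b) (min v (d.getD (pvNodeOf b) 0))) := by
      simp [pvStepA, hv]
    have hB : pvStepB (some g) b = some (g.modify (pvNodeOf b) [] (fun vs => vs ++ [v])) := by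
      simp [pvStepB, hv]
    rw [List.foldl_cons, List.foldl_cons, hA, hB]
    exact ih _ _ (fun x hx => hpre x (List.mem_cons_of_mem _ hx)) (pvRel_step d g _ v h)

-- ===== VERDICT (by name: the statement is the Claim_ definition above) =====
theorem create_standard_gen_bus_map_spec : Claim_equal_create_standard_gen_bus_map := by
  intro buses _ hpre
  unfold Spec_create_standard_gen_bus_map
  obtain ⟨d', g', hA, hB, hit, hnd, _⟩ := pvLoop buses _ _
    (fun b hb => by rw [pvVolt_eq]; exact hpre b hb) pvRel_empty
  unfold create_standard_gen_bus_map create_standard_gen_bus_map_alt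
  rw [hA, hB]
  simp only
  have hfresh : ∀ p ∈ g'.items, (PySem.Dict.empty : PySem.Dict String Int).contains p.1 = false :=
    fun p _ => PySem.Dict.contains_empty _
  have hnod : (g'.items.map (fun p => p.1)).Nodup := hnd
  rw [PySem.Dict.items_foldl_insert_fresh g'.items (fun p => p.1) (fun p => pvMin p.2) _ hfresh hnod]
  simpa using hit
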